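-- pv_equiv track=rewrite | github.com/LocalFreedom/python-utils | archive_win_driver.py | util_equal_sign_in_inf_line
-- ===== SOURCE A (Python) =====
-- def util_equal_sign_in_inf_line(s:str) -> bool:
-- 	quote = False
-- 	for c in s:
-- 		if c == '"':
-- 			quote = not quote
-- 		elif quote:
-- 			continue
-- 		elif c == '=':
-- 			return True
-- 	return False
-- ===== SOURCE B (Python) =====
-- def util_equal_sign_in_inf_line(s: str) -> bool:
--     # split on '"': even-indexed parts are the text outside quotes
--     return any('=' in part for part in s.split('"')[::2])
-- ===== Notes on version B (the rewrite author's own statement) =====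
-- stated objective: idiomatic
-- what changed: Replaces the stateful per-character scan with a quote toggle by one delimiter split: the even-indexed segments of s.split(the quote char) are the text outside quotes, and B tests those for the equal sign.
import Mathlib
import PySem

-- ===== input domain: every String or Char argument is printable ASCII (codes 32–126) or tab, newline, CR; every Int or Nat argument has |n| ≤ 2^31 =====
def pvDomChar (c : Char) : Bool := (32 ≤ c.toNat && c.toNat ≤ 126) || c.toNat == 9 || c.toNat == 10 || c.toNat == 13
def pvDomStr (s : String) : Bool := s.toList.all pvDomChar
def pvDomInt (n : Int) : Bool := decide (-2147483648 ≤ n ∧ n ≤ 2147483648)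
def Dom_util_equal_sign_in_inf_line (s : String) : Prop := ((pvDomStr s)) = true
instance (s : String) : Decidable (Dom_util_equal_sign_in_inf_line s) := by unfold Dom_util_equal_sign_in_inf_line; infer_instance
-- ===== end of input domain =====

-- B replaces A's stateful quote-toggle scan by splitting on '"' and testing the
-- even-indexed (outside-quotes) segments for '=' (objective: idiomatic).

-- ===== PORT A =====
-- the for-loop over s with the 'quote' flag, early return on an unquoted '='
def pvAuxA : List Char → Bool → Bool
  | [], _ => false
  | c :: rest, quote =>
    if c = '"' then pvAuxA rest (!quote)
    else if quote then pvAuxA rest quote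
    else if c = '=' then true
    else pvAuxA rest quote

def util_equal_sign_in_inf_line (s : String) : Bool := pvAuxA s.toList false

-- ===== PORT B =====
-- any('=' in part for part in s.split('"')[::2]); slice with literal step 2 never fails
def util_equal_sign_in_inf_line_alt (s : String) : Bool :=
  ((PySem.List.slice? (PySem.Chars.splitOn s.toList ['"']) none none 2).getD []).any
    (fun part => PySem.Chars.isIn ['='] part)

-- ===== PRECONDITION & SPEC =====
def Spec_util_equal_sign_in_inf_line (s : String) (out : Bool) : Prop := out = util_equal_sign_in_inf_line_alt s
instance (s : String) (out : Bool) : Decidable (Spec_util_equal_sign_in_inf_line s out) := by unfold Spec_util_equal_sign_in_inf_line; infer_instance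

-- ===== CLAIM (what is proved, stated in full; the proofs are below) =====
def Claim_equal_util_equal_sign_in_inf_line : Prop := ∀ (s : String), Dom_util_equal_sign_in_inf_line s → Spec_util_equal_sign_in_inf_line s (util_equal_sign_in_inf_line s)

-- ===== LEMMAS AND PROOFS =====

-- elements at even indices 0,2,4,… (what s[::2] keeps), and at odd indices
def pvEvens {α : Type} : List α → List α
  | [] => []
  | [x] => [x]
  | x :: _ :: r => x :: pvEvens r

def pvOdds {α : Type} (l : List α) : List α := pvEvens l.tail

theorem pvEvens_cons {α : Type} (x : α) (xs : List α) : pvEvens (x :: xs) = x :: pvOdds xs := by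
  cases xs <;> simp [pvEvens, pvOdds]

-- reference shape of split('"'): current (reversed) piece accumulator, no fuel
def pvSos : List Char → List Char → List (List Char)
  | [], cur => [cur.reverse]
  | c :: rest, cur => if c = '"' then cur.reverse :: pvSos rest [] else pvSos rest (c :: cur)

theorem pvGo_eq_sos : ∀ (fuel : Nat) (l cur : List Char) (acc : List (List Char)),
    l.length ≤ fuel →
    PySem.Chars.splitOn.go ['"'] fuel l cur acc = acc.reverse ++ pvSos l cur := by
  intro fuel
  induction fuel with
  | zero =>
    intro l cur acc h
    have : l = [] := by cases l <;> simp_all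
    subst this
    simp [PySem.Chars.splitOn.go, pvSos]
  | succ n ih =>
    intro l cur acc h
    cases l with
    | nil => simp [PySem.Chars.splitOn.go, pvSos]
    | cons c rest =>
      by_cases hc : c = '"'
      · subst hc
        rw [show PySem.Chars.splitOn.go ['"'] (n+1) ('"' :: rest) cur acc
              = PySem.Chars.splitOn.go ['"'] n rest [] (cur.reverse :: acc) by
              simp [PySem.Chars.splitOn.go, List.isPrefixOf]]
        rw [ih rest [] (cur.reverse :: acc) (by simpa using Nat.le_of_succ_le_succ h)]
        simp [pvSos]
      · rw [show PySem.Chars.splitOn.go ['"'] (n+1) (c :: rest) cur acc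
              = PySem.Chars.splitOn.go ['"'] n rest (c :: cur) acc by
              simp [PySem.Chars.splitOn.go, List.isPrefixOf, Ne.symm hc]]
        rw [ih rest (c :: cur) acc (by simpa using Nat.le_of_succ_le_succ h)]
        simp [pvSos, hc]

theorem pvSplitOn_eq_sos (l : List Char) : PySem.Chars.splitOn l ['"'] = pvSos l [] := by
  unfold PySem.Chars.splitOn
  rw [pvGo_eq_sos (l.length + 1) l [] [] (by omega)]
  simp

theorem pvIsIn_single (l : List Char) : PySem.Chars.isIn ['='] l = l.contains '=' := by
  rw [Bool.eq_iff_iff, PySem.Chars.isIn_iff_infix]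
  simp [List.infix_iff_prefix_suffix]
  constructor
  · rintro ⟨t, ht, hs⟩
    have : '=' ∈ t := ht.subset (by simp)
    exact hs.subset this
  · intro h
    obtain ⟨p, q, hpq⟩ := List.mem_iff_append.mp h
    exact ⟨'=' :: q, by simp, ⟨p, by simp [hpq]⟩⟩

-- the scan invariant: even pieces of the remaining split vs the flag-false scan,
-- odd pieces vs the flag-true scan
theorem pvScan : ∀ (cs cur : List Char),
    ((pvEvens (pvSos cs cur)).any (fun p => decide ('=' ∈ p))
        = (decide ('=' ∈ cur) || pvAuxA cs false))
    ∧ ((pvOdds (pvSos cs cur)).any (fun p => decide ('=' ∈ p)) = pvAuxA cs true) := by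
  intro cs
  induction cs with
  | nil =>
    intro cur
    constructor
    · simp [pvSos, pvEvens, pvAuxA]
    · simp [pvSos, pvOdds, pvEvens, pvAuxA]
  | cons c rest ih =>
    intro cur
    by_cases hc : c = '"'
    · subst hc
      have hsos : pvSos ('"' :: rest) cur = cur.reverse :: pvSos rest [] := by simp [pvSos]
      constructor
      · rw [hsos, pvEvens_cons, List.any_cons, (ih []).2]
        simp [pvAuxA]
      · rw [hsos]
        simp only [pvOdds, List.tail_cons]
        have h1 := (ih []).1
        simp only [List.not_mem_nil, decide_false, Bool.false_or] at h1
        rw [h1]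
        simp [pvAuxA]
    · constructor
      · simp only [pvSos, if_neg hc]
        rw [(ih (c :: cur)).1]
        by_cases he : c = '='
        · subst he; simp [pvAuxA, hc]
        · simp [pvAuxA, hc, he, Ne.symm he]

      · simp only [pvSos, if_neg hc]
        rw [(ih (c :: cur)).2]
        simp [pvAuxA, hc]

theorem pvFmEvens : ∀ (n : Nat) (l : List (List Char)), l.length ≤ n →
    List.filterMap (fun k : Nat => l[(2 * (k : Int)).toNat]?) (List.range ((l.length + 1) / 2))
      = pvEvens l := by
  intro n
  induction n with
  | zero =>
    intro l h
    have : l = [] := by cases l <;> simp_all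
    subst this; simp [pvEvens]
  | succ n ih =>
    intro l h
    match l with
    | [] => simp [pvEvens]
    | [a] => simp [pvEvens]
    | a :: b :: r =>
      have hr : r.length ≤ n := by simp at h; omega
      have h2 : ((a :: b :: r).length + 1) / 2 = (r.length + 1) / 2 + 1 := by simp; omega
      rw [h2, List.range_succ_eq_map, List.filterMap_cons, List.filterMap_map]
      simp only [Nat.cast_zero, mul_zero, Int.toNat_zero, List.getElem?_cons_zero]
      have hfun : ((fun k : Nat => (a :: b :: r)[(2 * (k : Int)).toNat]?) ∘ Nat.succ)
          = fun k : Nat => r[(2 * (k : Int)).toNat]? := by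
        funext k
        have hs : (2 * ((k : Int) + 1)).toNat = 2 * k + 1 + 1 := by omega
        have h2k : (2 * ((k : Nat) : Int)).toNat = 2 * k := by omega
        simp [Function.comp, hs, h2k, List.getElem?_cons_succ]
      rw [hfun, ih r hr]
      simp [pvEvens]

theorem pvSlice2 (l : List (List Char)) : PySem.List.slice? l none none 2 = some (pvEvens l) := by
  simp only [PySem.List.slice?, PySem.List.sliceIndices]
  simp only [show ¬((2:Int) = 0) by norm_num, if_false,
    show ¬((2:Int) < 0) by norm_num, show (0:Int) < 2 by norm_num, if_true, zero_add]
  have hcount : (if (0:Int) < (l.length : Int)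
      then (((l.length : Int) - 0 + 2 - 1) / 2).toNat else 0) = (l.length + 1) / 2 := by
    split <;> omega
  rw [hcount]
  exact congrArg some (pvFmEvens l.length l le_rfl)

-- ===== VERDICT (by name: the statement is the Claim_ definition above) =====
theorem util_equal_sign_in_inf_line_spec : Claim_equal_util_equal_sign_in_inf_line := by
  intro s _
  unfold Spec_util_equal_sign_in_inf_line util_equal_sign_in_inf_line util_equal_sign_in_inf_line_alt
  rw [pvSplitOn_eq_sos, pvSlice2]
  simp only [Option.getD_some, pvIsIn_single, List.contains_eq_mem]
  have h := (pvScan s.toList []).1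
  simp only [List.not_mem_nil, decide_false, Bool.false_or] at h
  exact h.symm
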